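-- pv_equiv track=rewrite | github.com/ifhakhyeon/hakhyeon-s_note | 파이썬/백준/백준 1992 쿼드트리 만들기.py | zeroone
-- ===== SOURCE A (Python) =====
-- def zeroone(list, N):
--     zerolist = ['0'*N for _ in range(N)]
--     onelist = ['1'*N for _ in range(N)]
--     if list == zerolist:
--         return '0'
--     elif list == onelist:
--         return '1'
--     else:
--         return '-1'
-- ===== SOURCE B (Python) =====
-- def zeroone(list, N):
--     if len(list) != N:
--         return '-1'
--     seen = set()
--     for row in list:
--         if len(row) != N:
--             return '-1'
--         seen |= set(row)
--     if seen == {'0'}: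
--         return '0'
--     if seen == {'1'}:
--         return '1'
--     return '-1'
-- ===== Notes on version B (the rewrite author's own statement) =====
-- stated objective: faster
-- what changed: Instead of materialising the two N-by-N reference grids and comparing the input against each, B checks the dimensions (row count, each row length) in one early-exit pass while accumulating the set of characters seen, and decides by whether that set is {'0'} or {'1'}.
-- intended difference: On list = [] with N <= 0, A's two reference grids are both empty so A accidentally returns '0' for an empty grid; B returns '-1', the intended answer since a grid of zeros must actually contain zeros. — e.g. on zeroone([], 0): A returns "0", B returns "-1"
import Mathlib
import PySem

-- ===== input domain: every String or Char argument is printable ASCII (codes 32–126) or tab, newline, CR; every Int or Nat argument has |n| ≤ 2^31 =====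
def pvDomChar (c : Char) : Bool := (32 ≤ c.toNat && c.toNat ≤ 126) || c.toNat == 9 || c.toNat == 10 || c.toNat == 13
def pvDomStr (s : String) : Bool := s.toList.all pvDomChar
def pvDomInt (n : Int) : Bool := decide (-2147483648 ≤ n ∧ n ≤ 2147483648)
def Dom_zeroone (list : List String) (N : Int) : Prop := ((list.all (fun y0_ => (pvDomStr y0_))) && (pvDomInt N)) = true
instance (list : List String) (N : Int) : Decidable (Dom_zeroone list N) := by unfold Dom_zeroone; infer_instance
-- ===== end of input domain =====

-- B judges the grid by dimension checks plus the SET of characters it contains (one pass, no reference grids);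
-- on ([], N ≤ 0) A's empty reference grids accidentally match and A returns "0" while B returns "-1" (intended).

-- ===== PORT A =====
-- '0'*N in Python: char repeated N times ('' for N ≤ 0); exact via PySem.List.pyRepeat on a singleton list.
def pvStrRep (c : Char) (n : Int) : String := String.ofList (PySem.List.pyRepeat [c] n)

def zeroone (list : List String) (N : Int) : String :=
  let zerolist := (PySem.List.pyRange 0 N 1).map (fun _ => pvStrRep '0' N)
  let onelist := (PySem.List.pyRange 0 N 1).map (fun _ => pvStrRep '1' N)
  if list = zerolist then "0"
  else if list = onelist then "1"
  else "-1"

-- ===== PORT B =====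
-- the for-loop of Source B: early return '-1' (none) on a wrong-length row, else accumulate the character set
def pvScan (N : Int) (rows : List String) (seen : PySem.Set Char) : Option (PySem.Set Char) :=
  match rows with
  | [] => some seen
  | r :: rs =>
    if PySem.Str.len r = N then pvScan N rs (PySem.Set.union seen r.toList)
    else none

def zeroone_alt (list : List String) (N : Int) : String :=
  if (list.length : Int) ≠ N then "-1"
  else
    match pvScan N list PySem.Set.empty with
    | none => "-1"
    | some seen =>
      if PySem.Set.equal seen ['0'] then "0"
      else if PySem.Set.equal seen ['1'] then "1"
      else "-1"

-- ===== PRECONDITION & SPEC =====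
-- On the degenerate input list = [] with N ≤ 0, A's two reference grids are both empty, so A accidentally
-- returns "0" for the empty list; B returns "-1" (intended: a grid of zeros must actually contain zeros).
def D_zeroone (list : List String) (N : Int) : Prop := list = [] ∧ N ≤ 0
instance (list : List String) (N : Int) : Decidable (D_zeroone list N) := by unfold D_zeroone; infer_instance

def Spec_zeroone (list : List String) (N : Int) (out : String) : Prop := ¬ D_zeroone list N → out = zeroone_alt list N
instance (list : List String) (N : Int) (out : String) : Decidable (Spec_zeroone list N out) := by unfold Spec_zeroone; infer_instance

def pvDiffWitness_zeroone : List String × Int := ([], 0)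
def pvDiffWitnessOut_zeroone : String × String := ("0", "-1")

-- ===== CLAIM (what is proved, stated in full; the proofs are below) =====
def Claim_unchanged_zeroone : Prop := ∀ (list : List String) (N : Int), Dom_zeroone list N → Spec_zeroone list N (zeroone list N)
def Claim_changed_zeroone : Prop := Dom_zeroone (pvDiffWitness_zeroone.1) (pvDiffWitness_zeroone.2) ∧ D_zeroone (pvDiffWitness_zeroone.1) (pvDiffWitness_zeroone.2) ∧ zeroone (pvDiffWitness_zeroone.1) (pvDiffWitness_zeroone.2) = pvDiffWitnessOut_zeroone.1 ∧ zeroone_alt (pvDiffWitness_zeroone.1) (pvDiffWitness_zeroone.2) = pvDiffWitnessOut_zeroone.2 ∧ pvDiffWitnessOut_zeroone.1 ≠ pvDiffWitnessOut_zeroone.2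
def Claim_exact_zeroone : Prop := ∀ (list : List String) (N : Int), Dom_zeroone list N → D_zeroone list N → zeroone list N ≠ zeroone_alt list N

-- ===== LEMMAS AND PROOFS =====

lemma pvRefGrid (N : Int) (ch : Char) :
    (PySem.List.pyRange 0 N 1).map (fun _ => pvStrRep ch N)
      = List.replicate N.toNat (String.ofList (List.replicate N.toNat ch)) := by
  have h : (N - 0).toNat = N.toNat := by omega
  rw [PySem.List.pyRange_one, List.map_map]
  simp only [pvStrRep, PySem.List.pyRepeat_singleton, Function.comp_def, List.map_const',
    List.length_range, h]

lemma pvKey (list : List String) (N : Int) (ch : Char) :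
    (list = (PySem.List.pyRange 0 N 1).map (fun _ => pvStrRep ch N))
      ↔ list.length = N.toNat ∧ ∀ row ∈ list, row.toList = List.replicate N.toNat ch := by
  rw [pvRefGrid, List.eq_replicate_iff]
  constructor
  · rintro ⟨h1, h2⟩
    exact ⟨h1, fun row hr => by rw [h2 row hr, String.toList_ofList]⟩
  · rintro ⟨h1, h2⟩
    refine ⟨h1, fun row hr => ?_⟩
    rw [← String.toList_inj, String.toList_ofList]
    exact h2 row hr

lemma pvScan_none (N : Int) (rows : List String) (seen : PySem.Set Char)
    (h : ∃ r ∈ rows, PySem.Str.len r ≠ N) : pvScan N rows seen = none := by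
  induction rows generalizing seen with
  | nil => simp at h
  | cons r rs ih =>
    obtain ⟨x, hx, hne⟩ := h
    unfold pvScan
    by_cases hr : PySem.Str.len r = N
    · rw [if_pos hr]
      apply ih
      rcases List.mem_cons.mp hx with h' | h'
      · exact absurd (h' ▸ hr) hne
      · exact ⟨x, h', hne⟩
    · rw [if_neg hr]

lemma pvScan_some (N : Int) (rows : List String) (seen : PySem.Set Char)
    (h : ∀ r ∈ rows, PySem.Str.len r = N) :
    ∃ s : PySem.Set Char, pvScan N rows seen = some s ∧
      ∀ c, c ∈ s ↔ (c ∈ seen ∨ ∃ r ∈ rows, c ∈ r.toList) := by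
  induction rows generalizing seen with
  | nil => exact ⟨seen, rfl, by simp⟩
  | cons r rs ih =>
    obtain ⟨s, hs, hmem⟩ := ih (PySem.Set.union seen r.toList) (fun x hx => h x (List.mem_cons_of_mem _ hx))
    refine ⟨s, ?_, ?_⟩
    · unfold pvScan
      rw [if_pos (h r List.mem_cons_self), hs]
    · intro c
      rw [hmem c, PySem.Set.mem_union]
      simp only [List.mem_cons]
      aesop

lemma pvEqualSingleton (s : PySem.Set Char) (ch : Char) :
    PySem.Set.equal s [ch] = true ↔ (ch ∈ s ∧ ∀ c ∈ s, c = ch) := by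
  rw [PySem.Set.equal_iff]
  constructor
  · intro h
    exact ⟨(h ch).mpr (List.mem_singleton.mpr rfl),
      fun c hc => List.mem_singleton.mp ((h c).mp hc)⟩
  · rintro ⟨h1, h2⟩ c
    constructor
    · intro hc; exact List.mem_singleton.mpr (h2 c hc)
    · intro hc; rw [List.mem_singleton.mp hc]; exact h1

-- for a fixed character ch, A's "list equals the ch-grid" test coincides with B's dimension + char-set test
lemma pvMain (list : List String) (N : Int) (ch : Char)
    (hD : ¬ (list = [] ∧ N ≤ 0))
    (hlen : (list.length : Int) = N)
    (hall : ∀ r ∈ list, PySem.Str.len r = N)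
    (s : PySem.Set Char)
    (hmem : ∀ c, c ∈ s ↔ (c ∈ (PySem.Set.empty : PySem.Set Char) ∨ ∃ r ∈ list, c ∈ r.toList)) :
    (list = (PySem.List.pyRange 0 N 1).map (fun _ => pvStrRep ch N))
      ↔ PySem.Set.equal s [ch] = true := by
  have hN : 0 < N := by
    rcases Nat.eq_zero_or_pos list.length with h0 | h0
    · exact absurd ⟨List.eq_nil_of_length_eq_zero h0, by omega⟩ hD
    · -- a row exists and has length N ≥ 0; list nonempty excludes D_, and length = N > 0
      omega
  simp only [PySem.Set.empty, List.not_mem_nil, false_or] at hmem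
  rw [pvKey, pvEqualSingleton]
  constructor
  · rintro ⟨h1, h2⟩
    have hne : list ≠ [] := by intro h; rw [h] at h1; simp at h1; omega
    obtain ⟨r, hr⟩ := List.exists_mem_of_ne_nil list hne
    constructor
    · rw [hmem]
      refine ⟨r, hr, ?_⟩
      rw [h2 r hr]
      exact List.mem_replicate.mpr ⟨by omega, rfl⟩
    · intro c hc
      obtain ⟨r', hr', hc'⟩ := (hmem c).mp hc
      have := h2 r' hr'
      rw [this] at hc'
      exact (List.mem_replicate.mp hc').2
  · rintro ⟨h1, h2⟩
    refine ⟨by omega, fun row hrow => ?_⟩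
    rw [List.eq_replicate_iff]
    have hlr : row.toList.length = N.toNat := by
      have := hall row hrow
      rw [PySem.Str.len_eq] at this
      omega
    exact ⟨hlr, fun c hc => h2 c ((hmem c).mpr ⟨row, hrow, hc⟩)⟩

-- ===== VERDICT (by name: the statement is the Claim_ definition above) =====
theorem zeroone_spec : Claim_unchanged_zeroone := by
  intro list N _ hD
  show zeroone list N = zeroone_alt list N
  by_cases hlen : (list.length : Int) = N
  · by_cases hall : ∀ r ∈ list, PySem.Str.len r = N
    · obtain ⟨s, hs, hmem⟩ := pvScan_some N list PySem.Set.empty hall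
      unfold zeroone zeroone_alt
      rw [if_neg (by omega : ¬ (list.length : Int) ≠ N), hs]
      simp only [pvMain list N '0' hD hlen hall s hmem, pvMain list N '1' hD hlen hall s hmem]
    · rw [not_forall] at hall; simp only [_root_.not_imp] at hall
      obtain ⟨r, hr, hne⟩ := hall
      unfold zeroone zeroone_alt
      rw [if_neg (by omega : ¬ (list.length : Int) ≠ N),
        pvScan_none N list PySem.Set.empty ⟨r, hr, hne⟩]
      have hrow : ∀ ch : Char, ¬ (list = (PySem.List.pyRange 0 N 1).map (fun _ => pvStrRep ch N)) := by
        intro ch h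
        obtain ⟨h1, h2⟩ := (pvKey list N ch).mp h
        apply hne
        rw [PySem.Str.len_eq, h2 r hr, List.length_replicate]
        have := List.length_pos_of_mem hr
        omega
      rw [if_neg (hrow '0'), if_neg (hrow '1')]
  · unfold zeroone zeroone_alt
    rw [if_pos hlen]
    have hrow : ∀ ch : Char, ¬ (list = (PySem.List.pyRange 0 N 1).map (fun _ => pvStrRep ch N)) := by
      intro ch h
      obtain ⟨h1, _⟩ := (pvKey list N ch).mp h
      by_cases hN : 0 < N
      · omega
      · have h0 : N.toNat = 0 := by omega
        rw [h0] at h1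
        exact hD ⟨List.eq_nil_of_length_eq_zero h1, by omega⟩
    rw [if_neg (hrow '0'), if_neg (hrow '1')]

theorem zeroone_changed : Claim_changed_zeroone := by unfold Claim_changed_zeroone; decide

theorem zeroone_tight : Claim_exact_zeroone := by
  intro list N _ hE
  obtain ⟨h1, h2⟩ := hE
  subst h1
  have hgrid : ∀ ch : Char, (PySem.List.pyRange 0 N 1).map (fun _ => pvStrRep ch N) = [] := by
    intro ch
    rw [pvRefGrid]
    have : N.toNat = 0 := by omega
    rw [this, List.replicate_zero]
  have hA : zeroone [] N = "0" := by
    unfold zeroone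
    simp [hgrid]
  have hB : zeroone_alt [] N = "-1" := by
    unfold zeroone_alt
    rcases lt_or_eq_of_le h2 with h | h
    · rw [if_pos (show ((([] : List String).length : Int) ≠ N) by simp; omega)]
    · subst h
      decide
  rw [hA, hB]
  decide
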